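-- pv_equiv track=rewrite | github.com/meechra/oscilKEY | app.py | inverse_xor_chain
-- ===== SOURCE A (Python) =====
-- def inverse_xor_chain(chained_bytes, iv):
--     """
--     Invert the XOR chaining to recover the original plaintext bytes.
--
--     :param chained_bytes: List of XOR chained 8-bit integers.
--     :param iv: Initialization vector used during encryption.
--     :return: List of original plaintext byte values.
--     """
--     recovered_bytes = []
--     prev = iv
--     for chained_byte in chained_bytes:
--         original_byte = chained_byte ^ prev
--         recovered_bytes.append(original_byte)
--         prev = chained_byte
--     return recovered_bytes
-- ===== SOURCE B (Python) =====
-- def inverse_xor_chain(chained_bytes, iv):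
--     """Recover plaintext by walking the chain backwards: each byte XORed with
--     the byte stored just before it; built back-to-front and reversed at the end."""
--     recovered = []
--     for i in range(len(chained_bytes) - 1, 0, -1):
--         recovered.append(chained_bytes[i] ^ chained_bytes[i - 1])
--     if chained_bytes:
--         recovered.append(chained_bytes[0] ^ iv)
--     recovered.reverse()
--     return recovered
-- ===== Notes on version B (the rewrite author's own statement) =====
-- stated objective: alternative
-- what changed: Replaced A's forward accumulator-threaded loop (carrying prev) with a stateless backward index walk: the output is built back-to-front from pairs chained_bytes[i]^chained_bytes[i-1] (plus the seed pair at index 0) and reversed once at the end.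
import Mathlib
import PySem

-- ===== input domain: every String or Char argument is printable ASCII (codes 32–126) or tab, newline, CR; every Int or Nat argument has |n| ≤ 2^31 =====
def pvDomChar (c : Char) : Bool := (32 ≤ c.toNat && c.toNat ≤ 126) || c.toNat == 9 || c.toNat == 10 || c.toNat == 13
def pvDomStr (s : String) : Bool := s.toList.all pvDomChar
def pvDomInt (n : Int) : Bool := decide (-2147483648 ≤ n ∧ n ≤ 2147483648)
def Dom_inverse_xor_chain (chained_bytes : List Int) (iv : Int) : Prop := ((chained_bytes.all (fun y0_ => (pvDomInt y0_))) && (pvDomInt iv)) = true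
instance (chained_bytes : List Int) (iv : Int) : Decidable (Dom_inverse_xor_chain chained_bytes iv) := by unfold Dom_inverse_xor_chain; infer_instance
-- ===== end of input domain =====

-- B replaces A's forward prev-carrying loop with a stateless backward index walk,
-- building the result back-to-front and reversing once (objective: alternative).

-- ===== PORT A =====
-- A: loop threading (recovered_bytes, prev); append chained_byte ^ prev, then prev := chained_byte.
def inverse_xor_chain (chained_bytes : List Int) (iv : Int) : List Int :=
  (chained_bytes.foldl (fun (st : List Int × Int) chained_byte =>
    (st.1 ++ [PySem.Int.bxor chained_byte st.2], chained_byte)) ([], iv)).1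

-- ===== PORT B =====
-- B: for i in range(n-1, 0, -1): append l[i] ^ l[i-1]; if l: append l[0] ^ iv; reverse.
-- Indices i and i-1 are always in range (1 ≤ i ≤ n-1), so pyGetD's default is never used — exact.
def inverse_xor_chain_alt (chained_bytes : List Int) (iv : Int) : List Int :=
  let n : Int := chained_bytes.length
  let recovered := (PySem.List.pyRange (n - 1) 0 (-1)).foldl
    (fun acc i => acc ++ [PySem.Int.bxor (PySem.List.pyGetD chained_bytes i 0)
                                         (PySem.List.pyGetD chained_bytes (i - 1) 0)]) []
  let recovered := if chained_bytes.isEmpty then recovered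
    else recovered ++ [PySem.Int.bxor (PySem.List.pyGetD chained_bytes 0 0) iv]
  recovered.reverse

-- ===== PRECONDITION & SPEC =====
def Spec_inverse_xor_chain (chained_bytes : List Int) (iv : Int) (out : List Int) : Prop := out = inverse_xor_chain_alt chained_bytes iv
instance (chained_bytes : List Int) (iv : Int) (out : List Int) : Decidable (Spec_inverse_xor_chain chained_bytes iv out) := by unfold Spec_inverse_xor_chain; infer_instance

-- ===== CLAIM (what is proved, stated in full; the proofs are below) =====
def Claim_equal_inverse_xor_chain : Prop := ∀ (chained_bytes : List Int) (iv : Int), Dom_inverse_xor_chain chained_bytes iv → Spec_inverse_xor_chain chained_bytes iv (inverse_xor_chain chained_bytes iv)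

-- ===== LEMMAS AND PROOFS =====

-- A's loop invariant: the accumulated list is acc ++ zip of the rest against (prev :: rest.dropLast).
theorem ixc_fold_A (l : List Int) (acc : List Int) (prev : Int) :
    (l.foldl (fun (st : List Int × Int) c => (st.1 ++ [PySem.Int.bxor c st.2], c)) (acc, prev)).1
      = acc ++ List.zipWith (fun c p => PySem.Int.bxor c p) l (prev :: l.dropLast) := by
  induction l generalizing acc prev with
  | nil => simp
  | cons c rest ih =>
    simp only [List.foldl_cons]
    rw [ih]
    cases rest with
    | nil => simp
    | cons d ds => simp [List.dropLast]

-- zipWith against (p :: l.dropLast) equals zipWith against (p :: l): the first list truncates both.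
theorem ixc_dropLast_zip (f : Int → Int → Int) (l : List Int) (p : Int) :
    List.zipWith f l (p :: l.dropLast) = List.zipWith f l (p :: l) := by
  induction l generalizing p with
  | nil => simp
  | cons c rest ih =>
    cases rest with
    | nil => simp
    | cons d ds =>
      show f c p :: List.zipWith f (d :: ds) (c :: (d :: ds).dropLast)
            = f c p :: List.zipWith f (d :: ds) (c :: d :: ds)
      rw [ih]

-- B's backward pairs, read in forward order, are the tail zipped against the list itself.
theorem ixc_pairs (l : List Int) :
    (PySem.List.pyRange 1 (l.length : Int) 1).map
      (fun i => PySem.Int.bxor (PySem.List.pyGetD l i 0) (PySem.List.pyGetD l (i - 1) 0))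
      = List.zipWith (fun c p => PySem.Int.bxor c p) l.tail l := by
  apply List.ext_getElem
  · simp [PySem.List.length_pyRange_one, List.length_tail]
  · intro k h1 h2
    simp only [List.getElem_map, PySem.List.getElem_pyRange_one, List.getElem_zipWith]
    have hk : k + 1 < l.length := by
      simp only [List.length_map, PySem.List.length_pyRange_one] at h1; omega
    have e1 : PySem.List.pyGetD l (1 + (k : Int)) 0 = l[(1 + (k : Int)).toNat]'(by omega) :=
      PySem.List.pyGetD_eq_getElem l 0 (by omega) (by omega)
    have e2 : PySem.List.pyGetD l (1 + (k : Int) - 1) 0 = l[(1 + (k : Int) - 1).toNat]'(by omega) :=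
      PySem.List.pyGetD_eq_getElem l 0 (by omega) (by omega)
    rw [e1, e2]
    have h1k : (1 + (k : Int)).toNat = k + 1 := by omega
    have h0k : (1 + (k : Int) - 1).toNat = k := by omega
    simp only [h1k, h0k]
    cases l with
    | nil => simp at hk
    | cons c rest => simp

-- Appending-singleton fold over the countdown range is the reversed forward map.
theorem ixc_fold_B (l : List Int) :
    ((PySem.List.pyRange ((l.length : Int) - 1) 0 (-1)).foldl
      (fun acc i => acc ++ [PySem.Int.bxor (PySem.List.pyGetD l i 0)
                                           (PySem.List.pyGetD l (i - 1) 0)]) [])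
      = ((PySem.List.pyRange 1 (l.length : Int) 1).map
          (fun i => PySem.Int.bxor (PySem.List.pyGetD l i 0)
                                   (PySem.List.pyGetD l (i - 1) 0))).reverse := by
  rw [PySem.List.foldl_append_singleton_eq_map, PySem.List.pyRange_neg_one_eq_reverse]
  simp [List.map_reverse]

-- ===== VERDICT (by name: the statement is the Claim_ definition above) =====
theorem inverse_xor_chain_spec : Claim_equal_inverse_xor_chain := by
  intro chained_bytes iv _
  show inverse_xor_chain chained_bytes iv = inverse_xor_chain_alt chained_bytes iv
  simp only [inverse_xor_chain, inverse_xor_chain_alt]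
  rw [ixc_fold_A, ixc_dropLast_zip, ixc_fold_B]
  cases chained_bytes with
  | nil => simp
  | cons c rest =>
    simp only [List.isEmpty_cons, if_neg Bool.false_ne_true, List.reverse_append,
      List.reverse_reverse, List.reverse_singleton]
    rw [ixc_pairs]
    simp [PySem.List.pyGetD_zero_cons]
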